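-- pv_equiv track=rewrite | github.com/arstotrix/programming | hw7/___mainprogram.py | search
-- ===== SOURCE A (Python) =====
-- def search(words,dict):
--     i = 0
--     for word in words:
--         if word[-3:] == "ing":
--             if word in dict:
--                 dict[word] += 1
--             else:
--                 dict[word] = 1
--     return dict
-- ===== SOURCE B (Python) =====
-- def search(words, dict):
--     # aggregate: count the matching words once, then merge into dict
--     ing = [w for w in words if w.endswith("ing")]
--     seen = []
--     for w in ing:
--         if w not in seen:
--             seen.append(w)
--     for w in seen:
--         dict[w] = dict.get(w, 0) + ing.count(w)
--     return dict
-- ===== Notes on version B (the rewrite author's own statement) =====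
-- stated objective: alternative
-- what changed: A increments the dict inside a single branch-and-increment loop over words; B first aggregates counts of the matching words (filter, dedup, list.count) and then merges each distinct word's total into the dict in a second pass.
import Mathlib
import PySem

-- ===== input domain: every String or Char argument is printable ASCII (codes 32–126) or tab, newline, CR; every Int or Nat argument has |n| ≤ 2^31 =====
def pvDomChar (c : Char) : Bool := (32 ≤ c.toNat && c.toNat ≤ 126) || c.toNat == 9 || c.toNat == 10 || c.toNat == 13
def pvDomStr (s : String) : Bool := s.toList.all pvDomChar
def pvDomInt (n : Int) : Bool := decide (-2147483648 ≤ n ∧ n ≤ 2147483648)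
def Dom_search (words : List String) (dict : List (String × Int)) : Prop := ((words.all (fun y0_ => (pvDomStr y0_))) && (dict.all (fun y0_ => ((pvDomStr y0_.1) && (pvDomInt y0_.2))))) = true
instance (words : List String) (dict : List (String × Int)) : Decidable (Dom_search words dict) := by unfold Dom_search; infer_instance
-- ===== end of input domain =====

-- B replaces A's branch-and-increment loop by an aggregate-then-merge pair of passes
-- (count the matching words first, then merge the counts into the dict); objective: alternative.
-- A mutates its dict argument in place; the equivalence proved here is about the RETURN value.

-- ===== PORT A =====
def search (words : List String) (dict : List (String × Int)) : List (String × Int) :=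
  (words.foldl
    (fun d w =>
      if PySem.Str.slice w (some (-3)) none = "ing" then
        if d.contains w then d.insert w (d.getD w 0 + 1) else d.insert w 1
      else d)
    (PySem.Dict.mk dict)).items

-- ===== PORT B =====
def search_alt (words : List String) (dict : List (String × Int)) : List (String × Int) :=
  let ing := words.filter (fun w => PySem.Str.endswith w "ing")
  let seen : PySem.Set String := PySem.Set.ofList ing
  (seen.foldl (fun d w => d.insert w (d.getD w 0 + (ing.count w : Int)))
    (PySem.Dict.mk dict)).items

-- ===== PRECONDITION & SPEC =====
-- Pre_ requires distinct keys in the association list: a Python dict argument never carries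
-- duplicate keys, so lists with duplicates do not denote any input A actually receives.
def Pre_search (words : List String) (dict : List (String × Int)) : Prop :=
  (dict.map Prod.fst).Nodup
instance (words : List String) (dict : List (String × Int)) : Decidable (Pre_search words dict) := by unfold Pre_search; infer_instance

def pvWitness_search : List String × (List (String × Int)) :=
  (["swing", "dog", "swing"], [("ring", 2), ("x", -1)])

def Spec_search (words : List String) (dict : List (String × Int)) (out : List (String × Int)) : Prop := out = search_alt words dict
instance (words : List String) (dict : List (String × Int)) (out : List (String × Int)) : Decidable (Spec_search words dict out) := by unfold Spec_search; infer_instance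

-- ===== CLAIM (what is proved, stated in full; the proofs are below) =====
def Claim_equal_search : Prop := ∀ (words : List String) (dict : List (String × Int)), Dom_search words dict → Pre_search words dict → Spec_search words dict (search words dict)

-- ===== LEMMAS AND PROOFS =====

-- A's test  word[-3:] == "ing"  is exactly  word.endswith("ing").
theorem slice_eq_ing_iff (w : String) :
    PySem.Str.slice w (some (-3)) none = "ing" ↔ PySem.Str.endswith w "ing" = true := by
  rw [PySem.Str.endswith_eq, PySem.Chars.endswith_iff]
  constructor
  · intro h
    have h' : PySem.List.slice w.toList (some (-3)) none = "ing".toList := by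
      have := congrArg String.toList h
      simpa [PySem.Str.slice, String.toList_ofList] using this
    rw [PySem.List.slice_from_neg_ofNat w.toList 3 (by omega)] at h'
    rw [← h']
    exact List.drop_suffix _ _
  · rintro ⟨t, ht⟩
    have hl : w.toList.length = t.length + 3 := by
      rw [← ht]; simp
    have hd : w.toList.drop (w.toList.length - 3) = "ing".toList := by
      rw [hl, Nat.add_sub_cancel, ← ht, List.drop_left]
    rw [show PySem.Str.slice w (some (-3)) none
          = String.ofList (PySem.Chars.slice w.toList (some (-3)) none) from rfl,
        PySem.Chars.slice_eq_listSlice,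
        PySem.List.slice_from_neg_ofNat w.toList 3 (by omega), hd]
    decide

-- Updating a set with the distinct elements of l is updating it with l.
theorem set_update_ofList {α : Type} [BEq α] [LawfulBEq α] (l : List α) (s : PySem.Set α) :
    PySem.Set.update s (PySem.Set.ofList l) = PySem.Set.update s l := by
  induction l using List.reverseRecOn with
  | nil => rfl
  | append_singleton l x ih =>
    have hof : PySem.Set.ofList (l ++ [x]) = PySem.Set.add (PySem.Set.ofList l) x := by
      simp [PySem.Set.ofList, List.foldl_append]
    have hr : PySem.Set.update s (l ++ [x]) = PySem.Set.add (PySem.Set.update s l) x := by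
      simp [PySem.Set.update, List.foldl_append]
    rw [hof, hr]
    by_cases hx : x ∈ l
    · have h1 : PySem.Set.add (PySem.Set.ofList l) x = PySem.Set.ofList l := by
        simp [PySem.Set.add, PySem.Set.contains, PySem.Set.mem_ofList, hx]
      have h2 : PySem.Set.add (PySem.Set.update s l) x = PySem.Set.update s l := by
        simp [PySem.Set.add, PySem.Set.contains, PySem.Set.mem_update, hx]
      rw [h1, ih, h2]
    · have h1 : PySem.Set.add (PySem.Set.ofList l) x = PySem.Set.ofList l ++ [x] := by
        simp [PySem.Set.add, PySem.Set.contains, PySem.Set.mem_ofList, hx]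
      have h3 : PySem.Set.update s (PySem.Set.ofList l ++ [x])
          = PySem.Set.add (PySem.Set.update s (PySem.Set.ofList l)) x := by
        simp [PySem.Set.update, List.foldl_append]
      rw [h1, h3, ih]

-- Merging additively over a duplicate-free key list reads each key once.
theorem getD_merge_nodup (m : List String) (g : String → Int)
    (d : PySem.Dict String Int) (hm : m.Nodup) (k : String) :
    (m.foldl (fun d w => d.insert w (d.getD w 0 + g w)) d).getD k 0
      = if k ∈ m then d.getD k 0 + g k else d.getD k 0 := by
  induction m generalizing d with
  | nil => simp
  | cons w m ih =>
    simp only [List.foldl_cons]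
    rw [ih _ hm.of_cons]
    by_cases hkm : k ∈ m
    · have hkw : k ≠ w := fun h => (List.nodup_cons.mp hm).1 (h ▸ hkm)
      simp [hkm, List.mem_cons, hkw, PySem.Dict.getD_insert_of_ne d _ _ hkw]
    · rw [if_neg hkm, PySem.Dict.getD_insert]
      by_cases hkw : k = w
      · subst hkw; simp
      · rw [if_neg hkw, if_neg (by simp [List.mem_cons, hkw, hkm])]

theorem search_eq_counting_fold (words : List String) (dict : List (String × Int)) :
    search words dict
      = ((words.filter (fun w => PySem.Str.endswith w "ing")).foldl
          (fun d w => d.insert w (d.getD w 0 + 1)) (PySem.Dict.mk dict)).items := by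
  unfold search
  rw [PySem.List.foldl_congr_mem _ _
      (fun d w => if PySem.Str.endswith w "ing" = true then d.insert w (d.getD w 0 + 1) else d) _
      (by
        intro d w _
        show _ = if PySem.Str.endswith w "ing" = true then d.insert w (d.getD w 0 + 1) else d
        rw [if_congr (slice_eq_ing_iff w) rfl rfl]
        by_cases hp : PySem.Str.endswith w "ing" = true
        · rw [if_pos hp, if_pos hp]
          by_cases hc : d.contains w = true
          · rw [if_pos hc]
          · rw [if_neg hc, PySem.Dict.getD_of_not_contains d 0 (by simpa using hc)]; norm_num
        · rw [if_neg hp, if_neg hp])]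
  rw [PySem.List.foldl_if_eq_foldl_filter]

-- ===== VERDICT (by name: the statement is the Claim_ definition above) =====
theorem search_spec : Claim_equal_search := by
  intro words dict _ hpre
  unfold Spec_search search_alt
  rw [search_eq_counting_fold]
  set ing := words.filter (fun w => PySem.Str.endswith w "ing") with hing
  set d0 := PySem.Dict.mk dict with hd0
  have hnd0 : d0.keys.Nodup := hpre
  have hndA : ((ing.foldl (fun d w => d.insert w (d.getD w 0 + 1)) d0)).keys.Nodup :=
    PySem.Dict.nodup_keys_foldl_insert ing _ d0 hnd0
  have hndB : (((PySem.Set.ofList ing).foldl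
      (fun d w => d.insert w (d.getD w 0 + (ing.count w : Int))) d0)).keys.Nodup :=
    PySem.Dict.nodup_keys_foldl_insert _ _ d0 hnd0
  rw [PySem.Dict.items_eq_map_keys _ hndA 0, PySem.Dict.items_eq_map_keys _ hndB 0]
  rw [PySem.Dict.keys_foldl_insert, PySem.Dict.keys_foldl_insert, set_update_ofList]
  apply List.map_congr_left
  intro k _
  rw [PySem.Dict.getD_foldl_insert_add_one,
    getD_merge_nodup (PySem.Set.ofList ing) (fun w => (ing.count w : Int)) d0
      (PySem.Set.nodup_ofList ing) k]
  by_cases hk : k ∈ ing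
  · simp [PySem.Set.mem_ofList, hk]
  · simp [PySem.Set.mem_ofList, hk, List.count_eq_zero_of_not_mem hk]
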